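-- pv_equiv track=rewrite | github.com/VitalyRomanov/method-embedding | SourceCodeTools/code/data/sourcetrail/sourcetrail_parse_bodies.py | extend_range
-- ===== SOURCE A (Python) =====
-- from typing import Tuple, List, Optional
--
-- def isnamechar(char: str) -> bool:
--     return "A" <= char <= "Z" or \
--            "a" <= char <= "z" or \
--            char == "." or \
--            char == "_" or \
--            "0" <= char <= "9"
--
-- def extend_range(start: int, end: int, line: str) -> Optional[Tuple[int, int]]:
--     # assume only the following symbols are possible in names: A-Z a-z 0-9 . _
--     if start - 1 > 0 and isnamechar(line[start-1]):
--         return extend_range(start - 1, end, line)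
--     elif start - 1 > 0 and line[start - 1] == "!":
--         # used in f-strings
--         # f"[{attr_selector!r}]"
--         return None
--     else:
--         if start - 1 > 0 and line[start] == "." and not isnamechar(line[start - 1]):
--             return start + 1, end
--         return start, end
-- ===== SOURCE B (Python) =====
-- from typing import Tuple, List, Optional
--
-- def isnamechar(char: str) -> bool:
--     return "A" <= char <= "Z" or \
--            "a" <= char <= "z" or \
--            char == "." or \
--            char == "_" or \
--            "0" <= char <= "9"
--
-- def extend_range(start: int, end: int, line: str) -> Optional[Tuple[int, int]]:
--     # iterative: walk start leftward with a while loop, then handle the terminal cases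
--     while start - 1 > 0 and isnamechar(line[start - 1]):
--         start -= 1
--     if start - 1 > 0 and line[start - 1] == "!":
--         return None
--     if start - 1 > 0 and line[start] == "." and not isnamechar(line[start - 1]):
--         return start + 1, end
--     return start, end
-- ===== Notes on version B (the rewrite author's own statement) =====
-- stated objective: simpler
-- what changed: Replaces A's tail recursion by a single while loop that moves start leftward, followed by a flat early-return chain for the terminal cases (no recursive calls, no nesting).
import Mathlib
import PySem

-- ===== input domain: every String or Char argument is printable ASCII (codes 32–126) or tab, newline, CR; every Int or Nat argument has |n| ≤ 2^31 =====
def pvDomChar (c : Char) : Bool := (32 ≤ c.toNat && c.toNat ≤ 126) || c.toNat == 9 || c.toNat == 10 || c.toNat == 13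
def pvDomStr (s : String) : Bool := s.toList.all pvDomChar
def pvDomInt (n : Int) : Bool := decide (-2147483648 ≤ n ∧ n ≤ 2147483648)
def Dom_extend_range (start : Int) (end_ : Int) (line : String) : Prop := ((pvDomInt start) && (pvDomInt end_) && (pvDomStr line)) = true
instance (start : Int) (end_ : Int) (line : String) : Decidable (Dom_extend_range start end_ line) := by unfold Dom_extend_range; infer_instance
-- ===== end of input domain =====

-- B rewrites A's tail recursion as a scan loop plus a flat terminal-case chain (simpler decomposition; same cost).

-- ===== PORT A =====
def isnamechar (c : Char) : Bool :=
  ('A' ≤ c && c ≤ 'Z') || ('a' ≤ c && c ≤ 'z') || c == '.' || c == '_' || ('0' ≤ c && c ≤ '9')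

-- literal transliteration of A's recursion over line.toList (pyGet? none = IndexError, excluded by Pre_)
def extendRangeA (start : Int) (end_ : Int) (cs : List Char) : Option (Int × Int) :=
  if _h : 0 < start - 1 then
    match PySem.List.pyGet? cs (start - 1) with
    | none => none  -- IndexError
    | some c =>
      if isnamechar c then extendRangeA (start - 1) end_ cs
      else if c == '!' then none
      else
        match PySem.List.pyGet? cs start with
        | none => none  -- IndexError
        | some c2 =>
          if c2 == '.' && !(isnamechar c) then some (start + 1, end_) else some (start, end_)
  else
    some (start, end_)
termination_by start.toNat
decreasing_by omega

def extend_range (start : Int) (end_ : Int) (line : String) : Option (Int × Int) :=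
  extendRangeA start end_ line.toList

-- ===== PORT B =====
-- the while loop of Source B: move start leftward while the char before it is a name char
def scanLeft (start : Int) (cs : List Char) : Int :=
  if _h : 0 < start - 1 ∧ ((PySem.List.pyGet? cs (start - 1)).any isnamechar = true) then
    scanLeft (start - 1) cs
  else start
termination_by start.toNat
decreasing_by omega

-- the early-return chain after Source B's loop
def afterScan (s : Int) (end_ : Int) (cs : List Char) : Option (Int × Int) :=
  if 0 < s - 1 ∧ PySem.List.pyGet? cs (s - 1) = some '!' then none
  else if 0 < s - 1 ∧ PySem.List.pyGet? cs s = some '.' ∧ (PySem.List.pyGet? cs (s - 1)).any isnamechar = false then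
    some (s + 1, end_)
  else some (s, end_)

def extend_range_alt (start : Int) (end_ : Int) (line : String) : Option (Int × Int) :=
  afterScan (scanLeft start line.toList) end_ line.toList

-- ===== PRECONDITION & SPEC =====
-- Pre_ excludes exactly the inputs on which A raises IndexError: start-1 > 0 with start-1 past the
-- end of line, or start = len(line) with a last character that is neither a name char nor '!'
-- (then the terminal branch reads line[start] out of range).
def Pre_extend_range (start : Int) (end_ : Int) (line : String) : Prop :=
  ¬ (1 ≤ start - 1 ∧
      ((line.toList.length : Int) ≤ start - 1 ∨
       (start = (line.toList.length : Int) ∧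
        line.toList.getLast?.any (fun c => isnamechar c || c == '!') = false)))
instance (start : Int) (end_ : Int) (line : String) : Decidable (Pre_extend_range start end_ line) := by
  unfold Pre_extend_range; infer_instance

def pvWitness_extend_range : Int × Int × String := (2, 5, "ab.cd")

def Spec_extend_range (start : Int) (end_ : Int) (line : String) (out : Option (Int × Int)) : Prop := out = extend_range_alt start end_ line
instance (start : Int) (end_ : Int) (line : String) (out : Option (Int × Int)) : Decidable (Spec_extend_range start end_ line out) := by unfold Spec_extend_range; infer_instance

-- ===== CLAIM (what is proved, stated in full; the proofs are below) =====
def Claim_equal_extend_range : Prop := ∀ (start : Int) (end_ : Int) (line : String), Dom_extend_range start end_ line → Pre_extend_range start end_ line → Spec_extend_range start end_ line (extend_range start end_ line)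

-- ===== LEMMAS AND PROOFS =====

-- the precondition, phrased on the list side
def PreL (start : Int) (cs : List Char) : Prop :=
  ¬ (1 ≤ start - 1 ∧
      ((cs.length : Int) ≤ start - 1 ∨
       (start = (cs.length : Int) ∧
        cs.getLast?.any (fun c => isnamechar c || c == '!') = false)))

lemma key (k : Nat) : ∀ (start end_ : Int) (cs : List Char), start.toNat ≤ k →
    PreL start cs → extendRangeA start end_ cs = afterScan (scanLeft start cs) end_ cs := by
  induction k with
  | zero =>
    intro start end_ cs hk _
    have hns : ¬ 1 < start := by omega
    rw [extendRangeA, scanLeft, afterScan]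
    simp [hns]
  | succ k ih =>
    intro start end_ cs hk hpre
    by_cases hpos : 0 < start - 1
    · -- start-1 in range (else Pre_ violated)
      have hlt : start - 1 < (cs.length : Int) := by
        by_contra hge
        exact hpre ⟨by omega, Or.inl (by omega)⟩
      have hget : PySem.List.pyGet? cs (start - 1) = some (cs[(start - 1).toNat]'(by omega)) :=
        PySem.List.pyGet?_eq_some_getElem cs (by omega) (by omega)
      obtain ⟨c, hget⟩ : ∃ c, PySem.List.pyGet? cs (start - 1) = some c := ⟨_, hget⟩
      have hcidx : cs[(start - 1).toNat]? = some c := by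
        rw [← PySem.List.pyGet?_of_nonneg cs (by omega : (0:Int) ≤ start - 1), hget]
      by_cases hname : isnamechar c = true
      · -- recurse on both sides
        rw [extendRangeA, scanLeft, dif_pos hpos, hget]
        simp only [hname, if_true]
        rw [dif_pos ⟨hpos, by simp [hname]⟩]
        have hpre' : PreL (start - 1) cs := by
          intro ⟨h1, h2⟩
          rcases h2 with h2 | ⟨h2, _⟩ <;> omega
        exact ih (start - 1) end_ cs (by omega) hpre'
      · -- loop stops here
        have hstop : ¬ ((0 < start - 1) ∧ (Option.any isnamechar (PySem.List.pyGet? cs (start - 1)) = true)) := by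
          rw [hget]; simp [hname]
        have hnameF : isnamechar c = false := by revert hname; cases isnamechar c <;> simp
        have hpos' : 1 < start := by omega
        rw [extendRangeA, scanLeft, dif_pos hpos, dif_neg hstop, hget]
        by_cases hbang : c = '!'
        · subst hbang; simp [afterScan, hget, hpos', hnameF]
        · -- start < len, else A raises (Pre_ violated)
          have hslt : start < (cs.length : Int) := by
            rcases lt_or_eq_of_le (by omega : start ≤ (cs.length : Int)) with h | h
            · exact h
            · exfalso
              apply hpre
              refine ⟨by omega, Or.inr ⟨h, ?_⟩⟩
              have hlast : cs.getLast? = some c := by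
                rw [List.getLast?_eq_getElem?, show cs.length - 1 = (start - 1).toNat by omega]
                exact hcidx
              rw [hlast]
              simp [hname, hbang]
          have hget2 : PySem.List.pyGet? cs start = some (cs[start.toNat]'(by omega)) :=
            PySem.List.pyGet?_eq_some_getElem cs (by omega) (by omega)
          obtain ⟨c2, hget2⟩ : ∃ c2, PySem.List.pyGet? cs start = some c2 := ⟨_, hget2⟩
          by_cases hdot : c2 = '.'
          · simp [afterScan, hget, hget2, hbang, hdot, hpos', hnameF]
          · simp [afterScan, hget, hget2, hbang, hdot, hpos', hnameF]
    · have hns : ¬ 1 < start := by omega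
      rw [extendRangeA, scanLeft, afterScan]
      simp [hns]

theorem extend_range_spec : Claim_equal_extend_range := by
  intro start end_ line _ hpre
  unfold Spec_extend_range extend_range extend_range_alt
  exact key start.toNat start end_ line.toList le_rfl hpre
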